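-- pv_equiv track=rewrite | github.com/YuneeeM/Python_Algorithm | 프로그래머스/2023/lv0/1009/1010-5.py | solution
-- ===== SOURCE A (Python) =====
-- def solution(A, B):
--
--     if A == B:
--         return 0
--
--     n = len(A)
--     cnt = 0
--
--     for _ in range(n):
--         temp = A[-1]
--         temp = temp+A[:-1]
--         A = temp
--         cnt += 1
--         if A == B:
--             return cnt
--     else:
--         return -1
-- ===== SOURCE B (Python) =====
-- def solution(A, B):
--     if len(A) != len(B):
--         return -1
--     return (B + B).find(A)
-- ===== Notes on version B (the rewrite author's own statement) =====
-- stated objective: faster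
-- what changed: A rotates the string one step at a time and compares after each rotation (n string rebuilds); B replaces the whole loop by a length check plus a single substring search (B+B).find(A), since the k-th right rotation of A equals B exactly when A occurs in B+B at index k.
import Mathlib
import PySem

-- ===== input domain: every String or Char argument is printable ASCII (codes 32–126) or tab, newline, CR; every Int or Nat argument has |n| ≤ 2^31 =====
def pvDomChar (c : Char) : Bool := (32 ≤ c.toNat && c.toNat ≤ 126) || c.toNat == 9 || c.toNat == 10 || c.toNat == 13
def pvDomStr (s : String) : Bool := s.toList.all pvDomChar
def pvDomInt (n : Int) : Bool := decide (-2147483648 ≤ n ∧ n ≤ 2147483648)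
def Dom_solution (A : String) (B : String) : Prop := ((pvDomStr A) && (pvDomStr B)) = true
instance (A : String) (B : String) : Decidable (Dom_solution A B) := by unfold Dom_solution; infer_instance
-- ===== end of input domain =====

-- B replaces A's O(n^2) rotate-and-compare loop by a length check plus a single substring
-- search (B+B).find(A) (faster, return value only; neither program mutates its arguments).

-- ===== PORT A =====
-- the 'for _ in range(n)' loop: fuel = remaining iterations, state = (A, cnt)
def solGo (B : List Char) : Nat → List Char → Int → Int
  | 0, _, _ => -1
  | f + 1, A, cnt =>
    match PySem.List.pyGet? A (-1) with          -- temp = A[-1]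
    | none => -1                                  -- IndexError; unreachable: the loop only runs when A is nonempty
    | some c =>
      let temp := c :: PySem.List.slice A none (some (-1))   -- temp = temp + A[:-1]
      if temp = B then cnt + 1
      else solGo B f temp (cnt + 1)

def solution (A : String) (B : String) : Int :=
  if A = B then 0
  else solGo B.toList (PySem.Str.len A).toNat A.toList 0

-- ===== PORT B =====
def solution_alt (A : String) (B : String) : Int :=
  if PySem.Str.len A ≠ PySem.Str.len B then -1
  else PySem.Str.find (B ++ B) A

-- ===== PRECONDITION & SPEC =====
def Spec_solution (A : String) (B : String) (out : Int) : Prop := out = solution_alt A B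
instance (A : String) (B : String) (out : Int) : Decidable (Spec_solution A B out) := by unfold Spec_solution; infer_instance

-- ===== CLAIM (what is proved, stated in full; the proofs are below) =====
def Claim_equal_solution : Prop := ∀ (A : String) (B : String), Dom_solution A B → Spec_solution A B (solution A B)

-- ===== LEMMAS AND PROOFS =====

-- the string after k right-rotations of A
def pvRot (A : List Char) (k : Nat) : List Char :=
  A.drop (A.length - k) ++ A.take (A.length - k)

theorem pvRot_zero (A : List Char) : pvRot A 0 = A := by simp [pvRot]

theorem pvRot_length (A : List Char) (k : Nat) : (pvRot A k).length = A.length := by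
  simp [pvRot]

theorem pvRot_succ (A : List Char) (k : Nat) (hk : k < A.length) :
    ∃ c, (pvRot A k).getLast? = some c ∧ c :: (pvRot A k).dropLast = pvRot A (k + 1) := by
  obtain ⟨m, hm1⟩ : ∃ m, A.length - k = m + 1 := ⟨A.length - k - 1, by omega⟩
  have hm : m < A.length := by omega
  have hsplit : pvRot A k = (A.drop (m + 1) ++ A.take m) ++ [A[m]] := by
    rw [pvRot, hm1, List.take_succ_eq_append_getElem hm, List.append_assoc]
  refine ⟨A[m], ?_, ?_⟩
  · rw [hsplit, List.getLast?_concat]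
  · rw [hsplit, List.dropLast_concat, pvRot]
    have h2 : A.length - (k + 1) = m := by omega
    rw [h2, List.drop_eq_getElem_cons hm, List.cons_append]

theorem solGo_step (B A : List Char) (f : Nat) (cnt : Int) (k : Nat) (hk : k < A.length) :
    solGo B (f + 1) (pvRot A k) cnt =
      if pvRot A (k + 1) = B then cnt + 1 else solGo B f (pvRot A (k + 1)) (cnt + 1) := by
  obtain ⟨c, h1, h2⟩ := pvRot_succ A k hk
  rw [solGo, PySem.List.pyGet?_neg_one, h1]
  simp only [PySem.List.slice_to_neg_one, h2]

theorem solGo_miss (B A : List Char) (f k : Nat) (hfk : k + f ≤ A.length)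
    (hmiss : ∀ j, k < j → j ≤ k + f → pvRot A j ≠ B) :
    solGo B f (pvRot A k) (k : Int) = -1 := by
  induction f generalizing k with
  | zero => rfl
  | succ f ih =>
    rw [solGo_step B A f (k : Int) k (by omega),
      if_neg (hmiss (k + 1) (by omega) (by omega))]
    have hc : ((k : Int) + 1) = ((k + 1 : Nat) : Int) := by push_cast; ring
    rw [hc]
    exact ih (k + 1) (by omega) (fun j h1 h2 => hmiss j (by omega) (by omega))

theorem solGo_hit (B A : List Char) (f k j : Nat) (hfk : k + f ≤ A.length)
    (hkj : k < j) (hjf : j ≤ k + f) (hhit : pvRot A j = B)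
    (hmin : ∀ i, k < i → i < j → pvRot A i ≠ B) :
    solGo B f (pvRot A k) (k : Int) = (j : Int) := by
  induction f generalizing k with
  | zero => omega
  | succ f ih =>
    rw [solGo_step B A f (k : Int) k (by omega)]
    by_cases h : j = k + 1
    · subst h; rw [if_pos hhit]; push_cast; ring
    · rw [if_neg (hmin (k + 1) (by omega) (by omega))]
      have hc : ((k : Int) + 1) = ((k + 1 : Nat) : Int) := by push_cast; ring
      rw [hc]
      exact ih (k + 1) (by omega) (by omega) (by omega)
        (fun i h1 h2 => hmin i (by omega) h2)

theorem pvRot_eq_iff (A B : List Char) (hn : A.length = B.length) (k : Nat)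
    (hk : k ≤ A.length) : pvRot A k = B ↔ A <+: (B ++ B).drop k := by
  constructor
  · intro h
    rw [← h]
    have hd : (A.drop (A.length - k)).length = k := by simp; omega
    have : (pvRot A k ++ pvRot A k).drop k =
        A.take (A.length - k) ++ (A.drop (A.length - k) ++ A.take (A.length - k)) := by
      rw [pvRot, List.append_assoc, List.drop_left' hd]
    rw [this, ← List.append_assoc, List.take_append_drop]
    exact List.prefix_append _ _
  · intro h
    have hkb : k ≤ B.length := by omega
    have h2 : (B ++ B).drop k = B.drop k ++ B := by
      rw [List.drop_append, Nat.sub_eq_zero_of_le hkb, List.drop_zero]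
    have hA : A = B.drop k ++ B.take k := by
      have h3 := List.prefix_iff_eq_take.mp h
      rw [h2, List.take_append] at h3
      have h4 : (B.drop k).take A.length = B.drop k :=
        List.take_of_length_le (by simp; omega)
      have h5 : A.length - (B.drop k).length = k := by simp; omega
      rw [h4, h5] at h3
      exact h3
    rw [pvRot, hA]
    have h6 : (List.drop k B ++ List.take k B).length - k = (List.drop k B).length := by
      simp only [List.length_append, List.length_drop, List.length_take]; omega
    rw [h6, List.drop_left, List.take_left, List.take_append_drop]

theorem find_double_self (b : List Char) : PySem.Chars.find (b ++ b) b = 0 := by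
  have hinf : b <:+: b ++ b := (List.prefix_append b b).isInfix
  have h0 : 0 ≤ PySem.Chars.find (b ++ b) b := (PySem.Chars.find_nonneg_iff (b ++ b) b).mpr hinf
  obtain ⟨-, hmin⟩ := PySem.Chars.find_spec h0
  by_contra hne
  have hpos : 0 < (PySem.Chars.find (b ++ b) b).toNat := by omega
  exact hmin 0 hpos (by simp)

-- ===== VERDICT (by name: the statement is the Claim_ definition above) =====
theorem solution_spec : Claim_equal_solution := by
  unfold Claim_equal_solution
  intro A B _
  unfold Spec_solution solution solution_alt
  by_cases hEq : A = B
  · subst hEq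
    rw [if_pos rfl, if_neg (by simp : ¬ PySem.Str.len A ≠ PySem.Str.len A),
      PySem.Str.find_eq]
    simp only [String.toList_append]
    exact (find_double_self A.toList).symm
  · rw [if_neg hEq]
    have hab : A.toList ≠ B.toList := fun h => hEq (String.toList_inj.mp h)
    by_cases hlen : A.toList.length = B.toList.length
    · rw [if_neg (by simp [PySem.Str.len_eq, hlen])]
      rw [PySem.Str.find_eq]
      simp only [String.toList_append, PySem.Str.len_eq, Int.toNat_natCast]
      set a := A.toList with ha
      set b := B.toList with hb
      set F := PySem.Chars.find (b ++ b) a with hF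
      by_cases hFneg : F = -1
      · -- no occurrence: no rotation matches
        have hninf : ¬ a <:+: b ++ b := (PySem.Chars.find_eq_neg_one_iff (b ++ b) a).mp hFneg
        rw [hFneg]
        have h0 : ((0 : Nat) : Int) = 0 := by norm_num
        rw [← h0]
        nth_rewrite 2 [← pvRot_zero a]
        apply solGo_miss b a a.length 0 (by omega)
        intro j hj1 hj2 hrot
        exact hninf (((pvRot_eq_iff a b hlen j (by omega)).mp hrot).isInfix.trans
          (List.drop_suffix j (b ++ b)).isInfix)
      · have h0F : 0 ≤ F := by have := PySem.Chars.neg_one_le_find (b ++ b) a; omega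
        obtain ⟨hpre, hmin⟩ := PySem.Chars.find_spec h0F
        set j := F.toNat with hj
        have hFle : F ≤ (b ++ b).length := PySem.Chars.find_le_length (b ++ b) a
        have hj2n : j ≤ b.length + b.length := by simp at hFle; omega
        have hjlen : a.length ≤ ((b ++ b).drop j).length := hpre.length_le
        have hjn : j ≤ a.length := by simp at hjlen; omega
        have hj0 : j ≠ 0 := by
          intro h
          rw [h, List.drop_zero, List.prefix_iff_eq_take] at hpre
          rw [List.take_append, List.take_of_length_le hlen.ge,
            Nat.sub_eq_zero_of_le hlen.le, List.take_zero, List.append_nil] at hpre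
          exact hab hpre
        have h0 : ((0 : Nat) : Int) = 0 := by norm_num
        rw [← h0]
        nth_rewrite 2 [← pvRot_zero a]
        have hgo : solGo b a.length (pvRot a 0) ((0 : Nat) : Int) = (j : Int) := by
          apply solGo_hit b a a.length 0 j (by omega) (by omega) (by omega)
          · exact (pvRot_eq_iff a b hlen j hjn).mpr hpre
          · intro i hi1 hi2 hrot
            exact hmin i hi2 ((pvRot_eq_iff a b hlen i (by omega)).mp hrot)
        rw [hgo]
        omega
    · -- lengths differ: A never equals B under rotation; B's port returns -1 by the guard
      rw [if_pos (by simp [PySem.Str.len_eq]; exact fun h => hlen h)]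
      rw [PySem.Str.len_eq, Int.toNat_natCast]
      have h0 : ((0 : Nat) : Int) = 0 := by norm_num
      rw [← h0]
      nth_rewrite 2 [← pvRot_zero A.toList]
      apply solGo_miss B.toList A.toList A.toList.length 0 (by omega)
      intro j hj1 hj2 hrot
      exact hlen (by rw [← pvRot_length A.toList j, hrot])
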